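-- pv_equiv track=rewrite | github.com/smithhmark/supreme-goggles | events.py | tallyPopulation
-- ===== SOURCE A (Python) =====
-- def tallyPopulation(events):
--     pop = 0
--     for event in events:
--         if event[0] == "entry":
--             pop +=1
--         elif event[0] == 'exit':
--             pop -= 1
--         yield (event[0], event[1], {"pop": pop})
-- ===== SOURCE B (Python) =====
-- def _prefix_sums(deltas):
--     sums = []
--     total = 0
--     for d in deltas:
--         total += d
--         sums.append(total)
--     return sums
--
--
-- def tallyPopulation(events):
--     evs = list(events)
--     deltas = [1 if kind == "entry" else -1 if kind == "exit" else 0 for kind, _ in evs]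
--     for (kind, val), pop in zip(evs, _prefix_sums(deltas)):
--         yield (kind, val, {"pop": pop})
-- ===== Notes on version B (the rewrite author's own statement) =====
-- stated objective: alternative
-- what changed: Replaces the single stateful loop (mutable pop updated per branch while yielding) by a map/scan/zip pipeline: map events to +1/-1/0 deltas, prefix-sum them, and zip the running sums back with the events.
import Mathlib
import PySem

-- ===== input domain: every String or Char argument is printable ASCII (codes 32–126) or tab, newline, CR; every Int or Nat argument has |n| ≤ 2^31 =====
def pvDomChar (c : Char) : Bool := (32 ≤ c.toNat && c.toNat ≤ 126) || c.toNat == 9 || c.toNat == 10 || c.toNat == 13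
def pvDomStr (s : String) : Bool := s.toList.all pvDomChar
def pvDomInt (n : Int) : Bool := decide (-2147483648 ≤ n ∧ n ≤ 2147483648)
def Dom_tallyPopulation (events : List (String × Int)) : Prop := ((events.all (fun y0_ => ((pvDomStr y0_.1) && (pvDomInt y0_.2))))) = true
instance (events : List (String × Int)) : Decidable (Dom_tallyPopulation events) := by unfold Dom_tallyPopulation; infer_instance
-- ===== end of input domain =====

-- B replaces A's single stateful generator loop by a map/scan/zip pipeline (objective: alternative decomposition, same cost).
-- ===== PORT A =====
-- A: one loop carrying the mutable pop and appending one output tuple per event.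
def tallyPopulation (events : List (String × Int)) : List (String × Int × (List (String × Int))) :=
  (events.foldl
    (fun (st : Int × List (String × Int × (List (String × Int)))) ev =>
      let pop := if ev.1 = "entry" then st.1 + 1 else if ev.1 = "exit" then st.1 - 1 else st.1
      (pop, st.2 ++ [(ev.1, ev.2, [("pop", pop)])]))
    (0, [])).2

-- ===== PORT B =====
-- port of Source B's _prefix_sums: loop with running total, appending each partial sum
def pvPrefixSums (deltas : List Int) : List Int :=
  (deltas.foldl (fun (st : Int × List Int) d => (st.1 + d, st.2 ++ [st.1 + d])) (0, [])).2

def tallyPopulation_alt (events : List (String × Int)) : List (String × Int × (List (String × Int))) :=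
  let deltas := events.map (fun ev => if ev.1 = "entry" then (1 : Int) else if ev.1 = "exit" then -1 else 0)
  List.zipWith (fun (ev : String × Int) (pop : Int) => (ev.1, ev.2, [("pop", pop)])) events (pvPrefixSums deltas)

-- ===== PRECONDITION & SPEC =====
def Spec_tallyPopulation (events : List (String × Int)) (out : List (String × Int × (List (String × Int)))) : Prop := out = tallyPopulation_alt events
instance (events : List (String × Int)) (out : List (String × Int × (List (String × Int)))) : Decidable (Spec_tallyPopulation events out) := by unfold Spec_tallyPopulation; infer_instance

-- ===== CLAIM =====
def Claim_equal_tallyPopulation : Prop := ∀ (events : List (String × Int)), Dom_tallyPopulation events → Spec_tallyPopulation events (tallyPopulation events)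

-- ===== LEMMAS AND PROOFS =====
-- common recursive reference: the output of the tally starting at population pop
def pvGo : List (String × Int) → Int → List (String × Int × (List (String × Int)))
  | [], _ => []
  | ev :: rest, pop =>
    let p := if ev.1 = "entry" then pop + 1 else if ev.1 = "exit" then pop - 1 else pop
    (ev.1, ev.2, [("pop", p)]) :: pvGo rest p

-- recursive reference for prefix sums starting at s
def pvSums : List Int → Int → List Int
  | [], _ => []
  | d :: rest, s => (s + d) :: pvSums rest (s + d)

theorem tallyA_go (events : List (String × Int)) :
    ∀ (pop : Int) (acc : List (String × Int × (List (String × Int)))),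
    (events.foldl
      (fun (st : Int × List (String × Int × (List (String × Int)))) ev =>
        let p := if ev.1 = "entry" then st.1 + 1 else if ev.1 = "exit" then st.1 - 1 else st.1
        (p, st.2 ++ [(ev.1, ev.2, [("pop", p)])]))
      (pop, acc)).2 = acc ++ pvGo events pop := by
  induction events with
  | nil => intro pop acc; simp [pvGo]
  | cons ev rest ih => intro pop acc; simp [List.foldl, pvGo, ih]

theorem sums_foldl (deltas : List Int) :
    ∀ (s : Int) (acc : List Int),
    (deltas.foldl (fun (st : Int × List Int) d => (st.1 + d, st.2 ++ [st.1 + d])) (s, acc)).2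
      = acc ++ pvSums deltas s := by
  induction deltas with
  | nil => intro s acc; simp [pvSums]
  | cons d rest ih => intro s acc; simp [List.foldl, pvSums, ih]

theorem zip_go (events : List (String × Int)) :
    ∀ (pop : Int),
    List.zipWith (fun (ev : String × Int) (p : Int) => (ev.1, ev.2, [("pop", p)])) events
      (pvSums (events.map (fun ev => if ev.1 = "entry" then (1 : Int) else if ev.1 = "exit" then -1 else 0)) pop)
      = pvGo events pop := by
  induction events with
  | nil => intro pop; simp [pvGo]
  | cons ev rest ih =>
    intro pop
    by_cases h1 : ev.1 = "entry" <;> by_cases h2 : ev.1 = "exit" <;>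
      simp [pvSums, pvGo, h1, h2, ih, sub_eq_add_neg]

-- ===== VERDICT =====
theorem tallyPopulation_spec : Claim_equal_tallyPopulation := by
  intro events _
  unfold Spec_tallyPopulation tallyPopulation tallyPopulation_alt pvPrefixSums
  rw [tallyA_go]
  simp only []
  rw [sums_foldl]
  simp [zip_go]
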